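-- pv_equiv track=rewrite | github.com/miliar/Code_Jam_Webscraper | solutions_python/solutions_year17_round1_nr1/454.py | mainf
-- ===== SOURCE A (Python) =====
-- def mainf(l,m,n):
-- 	s=""
-- 	l=l[1:]
-- 	for i in range (len(l)):
-- 		l[i]=str(l[i][0])
-- 	ll=len(l)
-- 	sl=[]
-- 	for i in range(ll):
-- 		allq=True
-- 		for j in l[i]:
-- 			if j!='?':
-- 				allq=False
-- 		if allq:
-- 			sl+=[0]
-- 			continue
-- 		temp=""
-- 		prc=0
-- 		cprc=True
-- 		ass='?'
-- 		for j in range(len(l[i])):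
-- 			if l[i][j]=="?":
-- 				if cprc==True:
-- 					prc+=1
-- 				else:
-- 					temp+=ass
-- 			else:
-- 				if cprc==True:
-- 					cprc=l[i][j]
-- 				temp+=l[i][j]
-- 				ass=l[i][j]
-- 		pre=prc*cprc+temp
-- 		sl+=[pre]
-- 	for i in range(len(sl)):
-- 		if sl[i]==0:
-- 			mo=True
-- 			for j in range(len(sl)):
-- 				if j>i and sl[j]!=0:
-- 					sl[i]=sl[j]
-- 					mo=False
-- 					break
-- 			if mo:
-- 				for j in range(len(sl)):
-- 					if len(sl)-j-1<i and sl[-j-1]!=0: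
-- 						sl[i]=sl[-j-1]
-- 						break
-- 		s+="\n"+sl[i]
--
--
--
--
-- 	return s
-- ===== SOURCE B (Python) =====
-- def mainf(l, m, n):
--     cs = [line[0] for line in l[1:]]
--     k = len(cs)
--     nxt = [None] * k
--     last = None
--     for i in range(k - 1, -1, -1):
--         if cs[i] != '?':
--             last = cs[i]
--         nxt[i] = last
--     out = []
--     prev = None
--     for c, nx in zip(cs, nxt):
--         if c != '?':
--             prev = c
--             out.append(c)
--         else:
--             out.append(nx if nx is not None else prev)
--     return "".join("\n" + c for c in out)
-- ===== Notes on version B (the rewrite author's own statement) =====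
-- stated objective: faster
-- what changed: Replaces A's per-line character machinery and its quadratic fill (for every empty line a linear forward scan and a linear backward scan over all lines) by two linear passes that precompute the nearest non-'?' value at-or-after each position and carry the last non-'?' value seen, so each line is filled in O(1).
import Mathlib
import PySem

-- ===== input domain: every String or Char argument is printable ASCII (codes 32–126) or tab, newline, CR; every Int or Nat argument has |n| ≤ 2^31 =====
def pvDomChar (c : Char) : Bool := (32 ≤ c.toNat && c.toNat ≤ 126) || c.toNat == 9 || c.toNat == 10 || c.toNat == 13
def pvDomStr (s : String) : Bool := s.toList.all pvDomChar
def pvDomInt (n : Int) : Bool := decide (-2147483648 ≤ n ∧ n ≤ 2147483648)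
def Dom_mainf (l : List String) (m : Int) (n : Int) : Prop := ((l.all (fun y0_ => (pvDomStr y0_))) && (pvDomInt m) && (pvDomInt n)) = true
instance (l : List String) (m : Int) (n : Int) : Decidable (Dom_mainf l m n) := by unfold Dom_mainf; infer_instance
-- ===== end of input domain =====

-- B replaces A's quadratic per-line forward/backward scans by two linear passes; equal return value on Pre_.

-- ===== PORT A =====
-- per-line processing of A's first loop body (allq test, then prc/cprc/temp/ass scan)
def mainfLine (li : List Char) : Option (List Char) :=
  let allq := li.foldl (fun a j => if j ≠ '?' then false else a) true
  if allq then none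
  else
    let st := li.foldl (fun (st : List Char × Nat × Option Char × Char) c =>
      if c = '?' then
        if st.2.2.1.isNone then (st.1, st.2.1 + 1, st.2.2.1, st.2.2.2)
        else (st.1 ++ [st.2.2.2], st.2.1, st.2.2.1, st.2.2.2)
      else
        (st.1 ++ [c], st.2.1, (if st.2.2.1.isNone then some c else st.2.2.1), c))
      ([], 0, none, '?')
    some (List.replicate st.2.1 (st.2.2.1.getD '?') ++ st.1)

-- one step of A's second loop (i-th iteration): forward scan, else backward scan, then append to s
def mainfStep (len : Nat) (st : List (Option (List Char)) × List Char) (i : Nat) :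
    List (Option (List Char)) × List Char :=
  let sl := st.1
  let sl' :=
    if (sl.getD i none).isNone then
      match (List.range len).find? (fun j => decide (i < j) && (sl.getD j none).isSome) with
      | some j => sl.set i (sl.getD j none)
      | none =>
        match (List.range len).find?
            (fun j => decide (len - 1 - j < i) && (sl.getD (len - 1 - j) none).isSome) with
        | some j => sl.set i (sl.getD (len - 1 - j) none)
        | none => sl
    else sl
  (sl', st.2 ++ '\n' :: ((sl'.getD i none).getD []))

def mainf (l : List String) (m : Int) (n : Int) : String :=
  let l1 := (l.drop 1).map (fun s => [(PySem.Str.pyGet? s 0).getD '?'])  -- str(l[i][0]); none (IndexError) excluded by Pre_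
  let sl := l1.map mainfLine
  let len := sl.length
  String.mk ((List.range len).foldl (mainfStep len) (sl, [])).2

-- ===== PORT B =====
def mainf_alt (l : List String) (m : Int) (n : Int) : String :=
  let cs := (l.drop 1).map (fun s => (PySem.Str.pyGet? s 0).getD '?')  -- line[0]; IndexError excluded by Pre_
  -- backward pass: nearest non-'?' at or after each position
  let nxt := (cs.foldr (fun c (acc : List (Option Char) × Option Char) =>
      let last := if c ≠ '?' then some c else acc.2
      (last :: acc.1, last)) ([], none)).1
  -- forward pass carrying the last non-'?' seen
  let out := ((cs.zip nxt).foldl (fun (st : List Char × Option Char) p =>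
      if p.1 ≠ '?' then (st.1 ++ [p.1], some p.1)
      else (st.1 ++ [p.2.getD (st.2.getD '?')], st.2)) ([], none)).1
  String.mk (out.foldl (fun acc c => acc ++ '\n' :: [c]) [])

-- ===== PRECONDITION & SPEC =====
-- Pre_ excludes exactly the inputs where A raises: an empty line after the first (IndexError on line[0]),
-- and a nonempty tail whose lines all start with '?' (A then concatenates str and int 0: TypeError).
def Pre_mainf (l : List String) (m : Int) (n : Int) : Prop :=
  (∀ s ∈ l.drop 1, s.toList ≠ []) ∧ (l.drop 1 ≠ [] → ∃ s ∈ l.drop 1, s.toList.head? ≠ some '?')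
instance (l : List String) (m : Int) (n : Int) : Decidable (Pre_mainf l m n) := by
  unfold Pre_mainf; infer_instance

def pvWitness_mainf : List String × Int × Int := (["2", "x?", "??", "?b"], 0, 0)

def Spec_mainf (l : List String) (m : Int) (n : Int) (out : String) : Prop := out = mainf_alt l m n
instance (l : List String) (m : Int) (n : Int) (out : String) : Decidable (Spec_mainf l m n out) := by
  unfold Spec_mainf; infer_instance

-- ===== CLAIM (what is proved, stated in full; the proofs are below) =====
def Claim_equal_mainf : Prop := ∀ (l : List String) (m : Int) (n : Int),
  Dom_mainf l m n → Pre_mainf l m n → Spec_mainf l m n (mainf l m n)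

-- ===== LEMMAS AND PROOFS =====

-- the value the filled line i must carry: own char if non-'?', else nearest non-'?' after, else nearest before
def specE (cs : List Char) (i : Nat) : Char :=
  if cs.getD i '?' ≠ '?' then cs.getD i '?'
  else ((cs.drop (i + 1)).find? (fun c => decide (c ≠ '?'))).getD
        ((((cs.take i).reverse).find? (fun c => decide (c ≠ '?'))).getD '?')

def gOpt (c : Char) : Option (List Char) := if c = '?' then none else some [c]

-- A's array after the first t iterations of the second loop
def mixA (cs : List Char) (t : Nat) : List (Option (List Char)) :=
  (List.range cs.length).map (fun k => if k < t then some [specE cs k] else gOpt (cs.getD k '?'))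

theorem mainfLine_singleton (c : Char) : mainfLine [c] = gOpt c := by
  by_cases h : c = '?' <;> simp [mainfLine, gOpt, h]

theorem length_mixA (cs : List Char) (t : Nat) : (mixA cs t).length = cs.length := by
  simp [mixA]

theorem gOpt_isSome (c : Char) : (gOpt c).isSome = decide (c ≠ '?') := by
  by_cases h : c = '?' <;> simp [gOpt, h]

theorem find?_congr' {α : Type} (p q : α → Bool) (l : List α) (h : ∀ a ∈ l, p a = q a) :
    l.find? p = l.find? q := by
  induction l with
  | nil => rfl
  | cons a t ih =>
    simp only [List.find?_cons, h a (by simp)]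
    cases hq : q a <;> simp [ih (fun x hx => h x (by simp [hx]))]

theorem mem_range'_iff (j s k : Nat) : j ∈ List.range' s k ↔ s ≤ j ∧ j < s + k := by
  rw [List.mem_range']
  constructor
  · rintro ⟨i, hi, rfl⟩; omega
  · rintro ⟨h1, h2⟩; exact ⟨j - s, by omega, by omega⟩

theorem getD_map_range' {α : Type} (n k : Nat) (f : Nat → Option α) :
    ((List.range n).map f).getD k none = if k < n then f k else none := by
  rcases Nat.lt_or_ge k n with h | h
  · simp [List.getD_eq_getElem?_getD, h]
  · rw [List.getD_eq_getElem?_getD, List.getElem?_eq_none_iff.2 (by simpa using h)]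
    simp [Nat.not_lt.2 h]

theorem mixA_getD (cs : List Char) (t k : Nat) :
    (mixA cs t).getD k none =
      if k < cs.length then (if k < t then some [specE cs k] else gOpt (cs.getD k '?')) else none := by
  rw [mixA, getD_map_range']

theorem mixA_zero (cs : List Char) : mixA cs 0 = cs.map gOpt := by
  apply List.ext_getElem (by simp [mixA])
  intro i h1 h2
  have hi : i < cs.length := by simpa [mixA] using h1
  simp [mixA, List.getD_eq_getElem?_getD, List.getElem?_eq_getElem hi]

theorem mixA_succ (cs : List Char) (t : Nat) (ht : t < cs.length) :
    mixA cs (t + 1) = (mixA cs t).set t (some [specE cs t]) := by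
  apply List.ext_getElem (by simp [mixA])
  intro i h1 h2
  have hi : i < cs.length := by simpa [mixA] using h1
  simp only [mixA, List.getElem_set, List.getElem_map, List.getElem_range,
    List.length_map, List.length_range]
  split_ifs <;> simp_all <;> omega

theorem specE_of_ne (cs : List Char) (t : Nat) (h : cs.getD t '?' ≠ '?') :
    specE cs t = cs.getD t '?' := by
  rw [specE, if_pos h]

theorem find_range'_drop (cs : List Char) (s k : Nat) (h : s + k = cs.length) :
    ((List.range' s k).find? (fun j => decide (cs.getD j '?' ≠ '?'))).map (fun j => cs.getD j '?')
      = (cs.drop s).find? (fun c => decide (c ≠ '?')) := by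
  induction k generalizing s with
  | zero =>
    have hd : cs.drop s = [] := List.drop_of_length_le (by omega)
    simp [hd]
  | succ k ih =>
    have hs : s < cs.length := by omega
    rw [List.range'_succ, List.drop_eq_getElem_cons hs]
    by_cases hc : cs[s] = '?'
    · rw [List.find?_cons_of_neg (by simp [List.getElem?_eq_getElem hs, hc]),
        List.find?_cons_of_neg (by simp [hc])]
      exact ih (s + 1) (by omega)
    · rw [List.find?_cons_of_pos (by simp [List.getElem?_eq_getElem hs, hc]),
        List.find?_cons_of_pos (by simp [hc])]
      simp [List.getElem?_eq_getElem hs]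

theorem specE_shift (cs : List Char) (u : Nat) (h2 : u + 1 < cs.length)
    (hq : cs.getD (u + 1) '?' = '?')
    (hnone : (cs.drop (u + 2)).find? (fun c => decide (c ≠ '?')) = none) :
    specE cs (u + 1) = specE cs u := by
  have hu : u < cs.length := by omega
  have hgu : cs.getD u '?' = cs[u] := List.getD_eq_getElem cs '?' hu
  have hq' : cs[u + 1] = '?' := by rw [← List.getD_eq_getElem cs '?' h2]; exact hq
  have htake : cs.take (u + 1) = cs.take u ++ [cs[u]] := by
    rw [List.take_add_one, List.getElem?_eq_getElem hu]; rfl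
  have hdrop1 : cs.drop (u + 1) = cs[u + 1] :: cs.drop (u + 2) := List.drop_eq_getElem_cons h2
  rw [specE, if_neg (fun hne => hne hq), hnone, Option.getD_none, htake,
    List.reverse_append, List.reverse_singleton, List.singleton_append]
  by_cases hc : cs[u] = '?'
  · rw [List.find?_cons_of_neg (by simp [hc]), specE,
      if_neg (fun hne => hne (by rw [hgu, hc])), hdrop1,
      List.find?_cons_of_neg (by simp [hq']), hnone, Option.getD_none]
  · rw [List.find?_cons_of_pos (by simp [hc]), specE, if_pos (by rw [hgu]; simp [hc]), hgu]
    rfl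

theorem range'_split (a L : Nat) (h : a ≤ L) :
    List.range' 0 L = List.range' 0 a ++ List.range' a (L - a) := by
  have h2 := (List.range'_append_1 (s := 0) (m := a) (n := L - a)).symm
  rw [Nat.zero_add, (by omega : a + (L - a) = L)] at h2
  exact h2

theorem mainfStep_mix (cs : List Char) (t : Nat) (S : List Char) (ht : t < cs.length)
    (hex : ∃ c ∈ cs, c ≠ '?') :
    mainfStep cs.length (mixA cs t, S) t = (mixA cs (t + 1), S ++ '\n' :: [specE cs t]) := by
  have hσt : (mixA cs t).getD t none = gOpt (cs.getD t '?') := by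
    rw [mixA_getD]; simp [ht]
  by_cases hc : cs.getD t '?' = '?'
  case neg =>
    have hmix : mixA cs (t + 1) = mixA cs t := by
      rw [mixA_succ cs t ht, specE_of_ne cs t hc]
      apply List.ext_getElem (by simp [length_mixA])
      intro i h1 h2
      have hi : i < cs.length := by simpa [length_mixA] using h2
      by_cases he : i = t
      · subst he
        have hc' : ¬ cs[i] = '?' := by rwa [List.getD_eq_getElem cs '?' hi] at hc
        simp [List.getElem_set, mixA, gOpt, hc', List.getElem?_eq_getElem hi]
      · simp [(show t ≠ i from fun hh => he hh.symm)]
    have hval : ((mixA cs t).getD t none).isNone = false := by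
      rw [hσt, gOpt, if_neg hc]; rfl
    simp only [mainfStep, hval, Bool.false_eq_true, if_false]
    refine Prod.ext hmix.symm ?_
    show S ++ '\n' :: ((mixA cs t).getD t none).getD [] = S ++ '\n' :: [specE cs t]
    rw [hσt, gOpt, if_neg hc, specE_of_ne cs t hc]
    rfl
  case pos =>
    have hσnone : (mixA cs t).getD t none = none := by rw [hσt, gOpt, if_pos hc]
    -- forward scan characterisation
    have hF : (List.range cs.length).find?
          (fun j => decide (t < j) && ((mixA cs t).getD j none).isSome)
        = (List.range' (t + 1) (cs.length - (t + 1))).find? (fun j => decide (cs.getD j '?' ≠ '?')) := by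
      rw [List.range_eq_range', range'_split (t + 1) cs.length (by omega), List.find?_append]
      have h1 : (List.range' 0 (t + 1)).find?
          (fun j => decide (t < j) && ((mixA cs t).getD j none).isSome) = none := by
        rw [List.find?_eq_none]
        intro j hj
        have : j ≤ t := by have := (mem_range'_iff j 0 (t + 1)).1 hj; omega
        simp [Nat.not_lt.2 this]
      rw [h1, Option.none_or]
      apply find?_congr'
      intro j hj
      have hj' := (mem_range'_iff j (t + 1) (cs.length - (t + 1))).1 hj
      rw [mixA_getD, if_pos (by omega), if_neg (by omega), gOpt_isSome,
        decide_eq_true (by omega : t < j), Bool.true_and]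
    rcases hF' : (List.range' (t + 1) (cs.length - (t + 1))).find?
        (fun j => decide (cs.getD j '?' ≠ '?')) with _ | j
    · -- no non-'?' after t
      have hDnone : (cs.drop (t + 1)).find? (fun c => decide (c ≠ '?')) = none := by
        rw [← find_range'_drop cs (t + 1) (cs.length - (t + 1)) (by omega), hF']; rfl
      cases t with
      | zero =>
        exfalso
        obtain ⟨c, hcmem, hcne⟩ := hex
        rcases hcs : cs with _ | ⟨a, u⟩
        · rw [hcs] at ht; simp at ht
        · have ha : a = '?' := by
            have := hc; rw [hcs] at this; simpa using this
          have hDnone' : u.find? (fun c => decide (c ≠ '?')) = none := by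
            have hdrop : cs.drop (0 + 1) = u := by rw [hcs]; rfl
            rw [hdrop] at hDnone; exact hDnone
          have hall := List.find?_eq_none.1 hDnone'
          rw [hcs] at hcmem
          rcases List.mem_cons.1 hcmem with rfl | hmem
          · exact hcne ha
          · exact hcne (by simpa using hall c hmem)
      | succ u =>
        -- backward scan finds the cell just before t (range position cs.length - (u + 1))
        have hG : (List.range cs.length).find?
              (fun j => decide (cs.length - 1 - j < u + 1) &&
                ((mixA cs (u + 1)).getD (cs.length - 1 - j) none).isSome)
            = some (cs.length - (u + 1)) := by
          rw [List.range_eq_range', range'_split (cs.length - (u + 1)) cs.length (by omega),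
            List.find?_append]
          have h1 : (List.range' 0 (cs.length - (u + 1))).find?
              (fun j => decide (cs.length - 1 - j < u + 1) &&
                ((mixA cs (u + 1)).getD (cs.length - 1 - j) none).isSome) = none := by
            rw [List.find?_eq_none]
            intro j hj
            have : j < cs.length - (u + 1) := by have := (mem_range'_iff j 0 _).1 hj; omega
            simp [show ¬ (cs.length - 1 - j < u + 1) from by omega]
          rw [h1, Option.none_or,
            show cs.length - (cs.length - (u + 1)) = u + 1 from by omega,
            List.range'_succ, List.find?_cons_of_pos]
          rw [show cs.length - 1 - (cs.length - (u + 1)) = u from by omega, mixA_getD,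
            if_pos (by omega), if_pos (by omega)]
          simp
        have hD2 : (cs.drop (u + 2)).find? (fun c => decide (c ≠ '?')) = none := by
          simpa [show u + 1 + 1 = u + 2 from rfl] using hDnone
        have hset : (mixA cs (u + 1)).set (u + 1) (some [specE cs u]) = mixA cs (u + 1 + 1) := by
          rw [show specE cs u = specE cs (u + 1) from (specE_shift cs u ht hc hD2).symm,
            ← mixA_succ cs (u + 1) ht]
        simp only [mainfStep, hσnone, Option.isNone_none, if_true, hF, hF', hG]
        rw [show cs.length - 1 - (cs.length - (u + 1)) = u from by omega,
          show (mixA cs (u + 1)).getD u none = some [specE cs u] from by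
            rw [mixA_getD, if_pos (by omega), if_pos (by omega)],
          hset]
        refine Prod.ext rfl ?_
        show S ++ '\n' :: ((mixA cs (u + 1 + 1)).getD (u + 1) none).getD [] = _
        rw [mixA_getD, if_pos ht, if_pos (by omega)]
        rfl
    · -- forward hit at index j
      have hjmem := List.mem_of_find?_eq_some hF'
      have hj' := (mem_range'_iff j (t + 1) (cs.length - (t + 1))).1 hjmem
      have hjp : cs.getD j '?' ≠ '?' := by simpa using List.find?_some hF'
      have hDj : (cs.drop (t + 1)).find? (fun c => decide (c ≠ '?')) = some (cs.getD j '?') := by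
        rw [← find_range'_drop cs (t + 1) (cs.length - (t + 1)) (by omega), hF']; rfl
      have hval : (mixA cs t).getD j none = some [cs.getD j '?'] := by
        rw [mixA_getD, if_pos (by omega), if_neg (by omega), gOpt, if_neg hjp]
      have hspec : specE cs t = cs.getD j '?' := by
        rw [specE, if_neg (fun hne => hne hc), hDj]; rfl
      simp only [mainfStep, hσnone, Option.isNone_none, if_true, hF, hF', hval]
      rw [← hspec, ← mixA_succ cs t ht]
      refine Prod.ext ?_ ?_
      · rfl
      · show S ++ '\n' :: ((mixA cs (t + 1)).getD t none).getD [] = _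
        rw [mixA_getD, if_pos ht, if_pos (by omega)]
        rfl

theorem phase2_go (cs : List Char) (hex : ∃ c ∈ cs, c ≠ '?') :
    ∀ (k t : Nat) (S : List Char), t + k = cs.length →
    (List.range' t k).foldl (mainfStep cs.length) (mixA cs t, S)
      = (mixA cs cs.length, S ++ ((List.range' t k).map (fun i => '\n' :: [specE cs i])).flatten) := by
  intro k
  induction k with
  | zero =>
    intro t S h
    have : t = cs.length := by omega
    subst this
    simp
  | succ k ih =>
    intro t S h
    rw [List.range'_succ, List.foldl_cons, mainfStep_mix cs t S (by omega) hex,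
      ih (t + 1) (S ++ '\n' :: [specE cs t]) (by omega)]
    simp

-- B's backward pass produces at each position the nearest non-'?' at or after it
theorem nxtPair_snd (cs : List Char) :
    (cs.foldr (fun c (acc : List (Option Char) × Option Char) =>
      ((if c = '?' then acc.2 else some c) :: acc.1, if c = '?' then acc.2 else some c)) ([], none)).2
    = cs.find? (fun c => decide (c ≠ '?')) := by
  induction cs with
  | nil => rfl
  | cons a t ih =>
    rw [List.foldr_cons]
    by_cases h : a = '?'
    · rw [List.find?_cons_of_neg (by simp [h])]
      simpa [h] using ih
    · rw [List.find?_cons_of_pos (by simp [h])]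
      simp [h]

theorem specE_here (p : List Char) (c : Char) (t : List Char) :
    specE (p ++ c :: t) p.length =
      if c = '?' then
        ((t.find? (fun x => decide (x ≠ '?'))).getD
          (((p.reverse).find? (fun x => decide (x ≠ '?'))).getD '?'))
      else c := by
  have h1 : (p ++ c :: t).getD p.length '?' = c := by
    simp [List.getD_eq_getElem?_getD]
  have h2 : (p ++ c :: t).drop (p.length + 1) = t := by simp
  have h3 : (p ++ c :: t).take p.length = p := List.take_left
  rw [specE, h1, h2, h3]
  by_cases h : c = '?' <;> simp [h]

theorem B_out (cs : List Char) : ∀ (p acc : List Char),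
    ((cs.zip (cs.foldr (fun c (acc : List (Option Char) × Option Char) =>
        ((if c = '?' then acc.2 else some c) :: acc.1, if c = '?' then acc.2 else some c)) ([], none)).1).foldl
      (fun (st : List Char × Option Char) q =>
        if q.1 = '?' then (st.1 ++ [q.2.getD (st.2.getD '?')], st.2)
        else (st.1 ++ [q.1], some q.1))
      (acc, p.reverse.find? (fun x => decide (x ≠ '?')))).1
    = acc ++ (List.range cs.length).map (fun i => specE (p ++ cs) (p.length + i)) := by
  induction cs with
  | nil => intro p acc; simp
  | cons c t ih =>
    intro p acc
    rw [List.foldr_cons, List.zip_cons_cons, List.foldl_cons]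
    have hassoc : p ++ c :: t = (p ++ [c]) ++ t := by simp
    have hlen : (p ++ [c]).length = p.length + 1 := by simp
    have hmapshift :
        (List.range t.length).map (fun i => specE ((p ++ [c]) ++ t) ((p ++ [c]).length + i))
          = (List.range t.length).map (fun i => specE (p ++ c :: t) (p.length + (i + 1))) := by
      apply List.map_congr_left
      intro i _
      rw [← hassoc, hlen]
      congr 1
      omega
    have hrange : (List.range (t.length + 1)).map (fun i => specE (p ++ c :: t) (p.length + i))
        = specE (p ++ c :: t) p.length
          :: (List.range t.length).map (fun i => specE (p ++ c :: t) (p.length + (i + 1))) := by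
      rw [List.range_succ_eq_map, List.map_cons, List.map_map]
      rfl
    by_cases h : c = '?'
    · rw [if_pos h, if_pos h]
      have hprev : ((p ++ [c]).reverse).find? (fun x => decide (x ≠ '?'))
          = (p.reverse).find? (fun x => decide (x ≠ '?')) := by
        rw [List.reverse_append, List.reverse_singleton, List.singleton_append,
          List.find?_cons_of_neg (by simp [h])]
      have := ih (p ++ [c]) (acc ++ [(t.foldr (fun c (acc : List (Option Char) × Option Char) =>
        ((if c = '?' then acc.2 else some c) :: acc.1, if c = '?' then acc.2 else some c))
          ([], none)).2.getD (((p.reverse).find? (fun x => decide (x ≠ '?'))).getD '?')])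
      rw [hprev] at this
      rw [this, hassoc, hmapshift, ← hassoc, List.length_cons, hrange, nxtPair_snd,
        specE_here, if_pos h]
      simp
    · rw [if_neg h, if_neg h]
      have hprev : ((p ++ [c]).reverse).find? (fun x => decide (x ≠ '?')) = some c := by
        rw [List.reverse_append, List.reverse_singleton, List.singleton_append,
          List.find?_cons_of_pos (by simp [h])]
      have := ih (p ++ [c]) (acc ++ [c])
      rw [hprev] at this
      rw [this, hassoc, hmapshift, ← hassoc, List.length_cons, hrange,
        specE_here, if_neg h]
      simp

-- ===== VERDICT (by name: the statement is the Claim_ definition above) =====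
theorem mainf_spec : Claim_equal_mainf := by
  intro l m n _ hpre
  unfold Spec_mainf mainf mainf_alt
  by_cases hd0 : l.drop 1 = []
  · rw [hd0]; rfl
  · simp only []
    set cs : List Char := (l.drop 1).map (fun s => (PySem.Str.pyGet? s 0).getD '?') with hcs
    have hsl : ((l.drop 1).map (fun s => [(PySem.Str.pyGet? s 0).getD '?'])).map mainfLine
        = cs.map gOpt := by
      rw [hcs, List.map_map, List.map_map]
      exact List.map_congr_left (fun s _ => mainfLine_singleton _)
    have hex : ∃ c ∈ cs, c ≠ '?' := by
      obtain ⟨s, hmem, hhead⟩ := hpre.2 hd0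
      have hsne := hpre.1 s hmem
      rcases hsl' : s.toList with _ | ⟨c0, rest⟩
      · exact absurd hsl' hsne
      · refine ⟨(PySem.Str.pyGet? s 0).getD '?', List.mem_map_of_mem hmem, ?_⟩
        have h0 : PySem.Str.pyGet? s (0 : Int) = s.toList[(0 : Nat)]? := by
          simpa using PySem.Str.pyGet?_natCast s 0
        rw [h0, hsl']
        simp only [List.getElem?_cons_zero, Option.getD_some]
        intro hcq
        exact hhead (by rw [hsl', hcq]; rfl)
    have hgo := phase2_go cs hex cs.length 0 [] (by omega)
    have hB := B_out cs [] []
    simp only [List.reverse_nil, List.find?_nil, List.nil_append, List.length_nil,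
      Nat.zero_add] at hB
    rw [hsl, show (cs.map gOpt).length = cs.length from by simp, ← mixA_zero,
      List.range_eq_range', hgo]
    simp only [ne_eq, ite_not]
    rw [hB, PySem.List.foldl_append_eq_flatMap, List.nil_append, List.nil_append,
      List.flatMap_def, List.map_map, ← List.range_eq_range']
    rfl
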